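-- pv_equiv track=rewrite | github.com/RamananVr/Leetcodepython | arrays/2640_find_the_score_of_all_prefixes_of_an_array.py | findPrefixScore
-- ===== SOURCE A (Python) =====
-- def findPrefixScore(nums):
--     """
--     Given an array nums, calculate the score of all prefixes of the array.
--     The score of a prefix is defined as the sum of the prefix elements plus
--     the maximum element in the prefix.
--
--     Args:
--     nums (List[int]): The input array.
--
--     Returns:
--     List[int]: A list containing the scores of all prefixes.
--     """
--     n = len(nums)
--     prefix_scores = []
--     max_so_far = float('-inf')
--     prefix_sum = 0
--
--     for num in nums:
--         prefix_sum += num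
--         max_so_far = max(max_so_far, num)
--         prefix_scores.append(prefix_sum + max_so_far)
--
--     return prefix_scores
-- ===== SOURCE B (Python) =====
-- def findPrefixScore(nums):
--     # Direct from the definition: each prefix's score computed independently.
--     return [sum(nums[:i + 1]) + max(nums[:i + 1]) for i in range(len(nums))]
-- ===== Notes on version B (the rewrite author's own statement) =====
-- stated objective: simpler
-- what changed: B drops A's incremental sum/max accumulator loop and instead evaluates each prefix independently, straight from the definition: score(i) = sum(nums[:i+1]) + max(nums[:i+1]); this is O(n^2) direct evaluation vs A's O(n) incremental scan.
import Mathlib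
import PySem

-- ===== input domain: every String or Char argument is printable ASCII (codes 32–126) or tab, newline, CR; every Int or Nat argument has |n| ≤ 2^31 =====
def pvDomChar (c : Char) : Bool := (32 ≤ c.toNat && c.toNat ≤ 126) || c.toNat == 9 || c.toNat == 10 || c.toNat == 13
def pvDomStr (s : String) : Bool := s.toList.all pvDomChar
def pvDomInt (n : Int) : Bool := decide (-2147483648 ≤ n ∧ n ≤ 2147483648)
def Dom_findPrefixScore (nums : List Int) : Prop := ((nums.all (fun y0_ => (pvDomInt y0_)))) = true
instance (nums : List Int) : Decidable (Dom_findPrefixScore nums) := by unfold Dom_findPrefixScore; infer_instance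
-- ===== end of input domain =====

-- B evaluates each prefix score directly from the definition (sum + max of every prefix) instead of A's fused accumulator loop; objective: simpler.


-- ===== PORT A =====
-- loop state: max_so_far is Option Int (none = float('-inf'); exact since max(-inf, num) = num)
def findPrefixScoreGoA (nums : List Int) (maxSoFar : Option Int) (prefixSum : Int) : List Int :=
  match nums with
  | [] => []
  | num :: rest =>
    let s := prefixSum + num
    let m := match maxSoFar with
             | none => num
             | some v => max v num
    (s + m) :: findPrefixScoreGoA rest (some m) s

def findPrefixScore (nums : List Int) : List Int :=
  findPrefixScoreGoA nums none 0

-- ===== PORT B =====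
-- Python max(xs) on a nonempty list: fold max over the tail seeded with the head
def pyMaxHead (m : Int) : List Int → Int
  | [] => m
  | x :: xs => pyMaxHead (max m x) xs

-- nums[:i+1] with i+1 ≥ 0 is exactly List.take (i+1); sum(...) is List.sum.
-- max(...) on the (always nonempty) slice: the [] branch is unreachable (0 is arbitrary).
def findPrefixScore_alt (nums : List Int) : List Int :=
  (List.range nums.length).map (fun i =>
    (nums.take (i + 1)).sum +
      (match nums.take (i + 1) with
       | [] => 0
       | h :: t => pyMaxHead h t))

-- ===== PRECONDITION & SPEC =====
def Spec_findPrefixScore (nums : List Int) (out : List Int) : Prop := out = findPrefixScore_alt nums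
instance (nums : List Int) (out : List Int) : Decidable (Spec_findPrefixScore nums out) := by unfold Spec_findPrefixScore; infer_instance

-- ===== CLAIM (what is proved, stated in full; the proofs are below) =====
def Claim_equal_findPrefixScore : Prop := ∀ (nums : List Int), Dom_findPrefixScore nums → Spec_findPrefixScore nums (findPrefixScore nums)

-- ===== LEMMAS AND PROOFS =====

theorem goA_eq_map (ns : List Int) : ∀ (m s : Int),
    findPrefixScoreGoA ns (some m) s =
      (List.range ns.length).map (fun i =>
        s + (ns.take (i + 1)).sum + pyMaxHead m (ns.take (i + 1))) := by
  induction ns with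
  | nil => intro m s; rfl
  | cons x r ih =>
    intro m s
    simp only [findPrefixScoreGoA, List.length_cons, List.range_succ_eq_map, List.map_cons,
      List.map_map, List.take, List.sum_cons, pyMaxHead]
    apply congrArg₂ (· :: ·)
    · simp
    · rw [ih (max m x) (s + x)]
      apply List.map_congr_left
      intro i _
      simp only [Function.comp, Nat.succ_eq_add_one]
      omega

-- ===== VERDICT (by name: the statement is the Claim_ definition above) =====
theorem findPrefixScore_spec : Claim_equal_findPrefixScore := by
  intro nums _
  show findPrefixScore nums = findPrefixScore_alt nums
  cases nums with
  | nil => rfl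
  | cons x r =>
    simp only [findPrefixScore, findPrefixScore_alt, findPrefixScoreGoA, List.length_cons,
      List.range_succ_eq_map, List.map_cons, List.map_map, List.take, List.sum_cons,
      pyMaxHead, zero_add]
    apply congrArg₂ (· :: ·)
    · simp
    · rw [goA_eq_map r x x]
      apply List.map_congr_left
      intro i _
      simp only [Function.comp, Nat.succ_eq_add_one]
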